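-- pv_equiv track=rewrite | github.com/zackeua/AdventOfCode | 2022/dag15/15_2.py | get_possible_coordinates
-- ===== SOURCE A (Python) =====
-- def get_possible_coordinates(sensor_list, sensor_distance):
--     for sensor in sensor_list:
--         distance = sensor_distance[sensor]
--         p1 = (sensor[0] + distance + 1, sensor[1])
--         p2 = (sensor[0], sensor[1] + distance + 1)
--         p3 = (sensor[0] - distance - 1, sensor[1])
--         p4 = (sensor[0], sensor[1] - distance - 1)
--         current_pos = p1
--         while current_pos != p2:
--             yield current_pos
--             current_pos = (current_pos[0] - 1, current_pos[1] + 1)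
--         while current_pos != p3:
--             yield current_pos
--             current_pos = (current_pos[0] - 1, current_pos[1] - 1)
--         while current_pos != p4:
--             yield current_pos
--             current_pos = (current_pos[0] + 1, current_pos[1] - 1)
--         while current_pos != p1:
--             yield current_pos
--             current_pos = (current_pos[0] + 1, current_pos[1] + 1)
-- ===== SOURCE B (Python) =====
-- def get_possible_coordinates(sensor_list, sensor_distance):
--     for sensor in sensor_list:
--         sx, sy = sensor
--         d = sensor_distance[sensor]
--         # first edge of the radius-(d+1) diamond, top-right, corner included
--         edge = [(sx + d + 1 - i, sy + i) for i in range(d + 1)]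
--         # the remaining edges are successive 90-degree rotations about the sensor
--         for _ in range(4):
--             yield from edge
--             edge = [(sx - (y - sy), sy + (x - sx)) for (x, y) in edge]
-- ===== Notes on version B (the rewrite author's own statement) =====
-- stated objective: alternative
-- what changed: B computes only the first diamond edge in closed form and derives the other three edges by repeatedly mapping a 90-degree rotation about the sensor over the previous edge, instead of A's four while-loops that step a mutable position diagonally until it hits precomputed corner sentinels.
-- outside the precondition, e.g. on get_possible_coordinates([(0, 0)], {(0, 0): -2}): A does not finish within the time limit, B returns []; on get_possible_coordinates([(0, 0)], {}): A raises KeyError, B raises KeyError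
import Mathlib
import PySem

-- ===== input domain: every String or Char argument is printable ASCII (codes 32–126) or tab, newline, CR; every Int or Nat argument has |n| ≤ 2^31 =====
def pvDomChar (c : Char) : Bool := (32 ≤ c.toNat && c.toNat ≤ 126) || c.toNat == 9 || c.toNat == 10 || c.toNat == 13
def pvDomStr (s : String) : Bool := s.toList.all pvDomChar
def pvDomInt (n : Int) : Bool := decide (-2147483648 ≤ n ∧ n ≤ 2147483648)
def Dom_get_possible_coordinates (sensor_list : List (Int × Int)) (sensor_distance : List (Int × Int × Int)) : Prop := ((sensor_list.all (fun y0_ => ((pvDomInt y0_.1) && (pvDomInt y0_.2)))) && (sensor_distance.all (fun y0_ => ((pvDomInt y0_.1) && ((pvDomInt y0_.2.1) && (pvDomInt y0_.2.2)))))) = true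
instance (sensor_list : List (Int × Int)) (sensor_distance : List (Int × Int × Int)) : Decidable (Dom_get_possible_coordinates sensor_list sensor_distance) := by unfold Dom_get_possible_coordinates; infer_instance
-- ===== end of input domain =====

-- B computes one diamond edge in closed form and derives the other three by repeated
-- 90-degree rotation about the sensor, instead of A's corner-sentinel stepping walk
-- (objective: alternative).

-- ===== PORT A =====
-- dict lookup sensor_distance[sensor]: first entry whose key (the first two components) matches;
-- none = KeyError (excluded by Pre_).
def pvLookup (s : Int × Int) : List (Int × Int × Int) → Option Int
  | [] => none
  | t :: ts => if t.1 = s.1 ∧ t.2.1 = s.2 then some t.2.2 else pvLookup s ts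

-- one while-loop of A: step `st` from `cur` until it equals `target`, yielding each position.
-- fuel makes the recursion total; under Pre_ the loop always terminates within the fuel given.
def pvEdge (fuel : Nat) (cur target st : Int × Int) (acc : List (Int × Int)) :
    List (Int × Int) × (Int × Int) :=
  match fuel with
  | 0 => (acc, cur)
  | n + 1 =>
      if cur = target then (acc, cur)
      else pvEdge n (cur.1 + st.1, cur.2 + st.2) target st (acc ++ [cur])

def get_possible_coordinates (sensor_list : List (Int × Int)) (sensor_distance : List (Int × Int × Int)) : List (Int × Int) :=
  sensor_list.foldl (fun acc sensor =>
    match pvLookup sensor sensor_distance with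
    | none => acc  -- Python raises KeyError here; Pre_ excludes it
    | some distance =>
      let p1 := (sensor.1 + distance + 1, sensor.2)
      let p2 := (sensor.1, sensor.2 + distance + 1)
      let p3 := (sensor.1 - distance - 1, sensor.2)
      let p4 := (sensor.1, sensor.2 - distance - 1)
      let fuel := (distance + 2).toNat
      let r1 := pvEdge fuel p1 p2 (-1, 1) acc
      let r2 := pvEdge fuel r1.2 p3 (-1, -1) r1.1
      let r3 := pvEdge fuel r2.2 p4 (1, -1) r2.1
      let r4 := pvEdge fuel r3.2 p1 (1, 1) r3.1
      r4.1) []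

-- ===== PORT B =====
def get_possible_coordinates_alt (sensor_list : List (Int × Int)) (sensor_distance : List (Int × Int × Int)) : List (Int × Int) :=
  sensor_list.foldl (fun acc sensor =>
    match pvLookup sensor sensor_distance with
    | none => acc  -- Python raises KeyError here; Pre_ excludes it
    | some d =>
      let sx := sensor.1
      let sy := sensor.2
      -- first edge of the radius-(d+1) diamond, top-right, corner included
      let edge := (PySem.List.pyRange 0 (d + 1) 1).map (fun i => (sx + d + 1 - i, sy + i))
      -- the remaining edges are successive 90-degree rotations about the sensor
      ((List.range 4).foldl (fun (st : List (Int × Int) × List (Int × Int)) _ =>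
          (st.1 ++ st.2, st.2.map (fun p => (sx - (p.2 - sy), sy + (p.1 - sx)))))
        (acc, edge)).1) []

-- ===== PRECONDITION & SPEC =====
-- Pre_ excludes exactly the inputs on which Python A does not return: a sensor missing from the
-- dict (KeyError) or a distance below -1 (the while-loops never reach their target: divergence).
def Pre_get_possible_coordinates (sensor_list : List (Int × Int)) (sensor_distance : List (Int × Int × Int)) : Prop :=
  ∀ s ∈ sensor_list, (∃ t ∈ sensor_distance, t.1 = s.1 ∧ t.2.1 = s.2) ∧
    (∀ t ∈ sensor_distance, t.1 = s.1 → t.2.1 = s.2 → -1 ≤ t.2.2)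
instance (sensor_list : List (Int × Int)) (sensor_distance : List (Int × Int × Int)) : Decidable (Pre_get_possible_coordinates sensor_list sensor_distance) := by unfold Pre_get_possible_coordinates; infer_instance
def pvWitness_get_possible_coordinates : (List (Int × Int)) × (List (Int × Int × Int)) := ([(0, 0), (3, -2)], [(0, 0, 1), (3, -2, 0)])

def Spec_get_possible_coordinates (sensor_list : List (Int × Int)) (sensor_distance : List (Int × Int × Int)) (out : List (Int × Int)) : Prop := out = get_possible_coordinates_alt sensor_list sensor_distance
instance (sensor_list : List (Int × Int)) (sensor_distance : List (Int × Int × Int)) (out : List (Int × Int)) : Decidable (Spec_get_possible_coordinates sensor_list sensor_distance out) := by unfold Spec_get_possible_coordinates; infer_instance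

-- ===== CLAIM (what is proved, stated in full; the proofs are below) =====
def Claim_equal_get_possible_coordinates : Prop := ∀ (sensor_list : List (Int × Int)) (sensor_distance : List (Int × Int × Int)), Dom_get_possible_coordinates sensor_list sensor_distance → Pre_get_possible_coordinates sensor_list sensor_distance → Spec_get_possible_coordinates sensor_list sensor_distance (get_possible_coordinates sensor_list sensor_distance)

-- ===== LEMMAS AND PROOFS =====

theorem pvLookup_isSome (s : Int × Int) (sd : List (Int × Int × Int))
    (h : ∃ t ∈ sd, t.1 = s.1 ∧ t.2.1 = s.2) : (pvLookup s sd).isSome = true := by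
  induction sd with
  | nil => simp at h
  | cons t ts ih =>
    by_cases hc : t.1 = s.1 ∧ t.2.1 = s.2
    · simp [pvLookup, hc]
    · rw [pvLookup, if_neg hc]
      rcases h with ⟨u, hu, hup⟩
      rcases List.mem_cons.mp hu with rfl | hu'
      · exact absurd hup hc
      · exact ih ⟨u, hu', hup⟩

theorem pvLookup_some_mem (s : Int × Int) (sd : List (Int × Int × Int)) (d : Int)
    (h : pvLookup s sd = some d) : ∃ t ∈ sd, t.1 = s.1 ∧ t.2.1 = s.2 ∧ t.2.2 = d := by
  induction sd with
  | nil => simp [pvLookup] at h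
  | cons t ts ih =>
    by_cases hc : t.1 = s.1 ∧ t.2.1 = s.2
    · rw [pvLookup, if_pos hc] at h
      exact ⟨t, List.mem_cons_self .., hc.1, hc.2, Option.some.inj h⟩
    · rw [pvLookup, if_neg hc] at h
      obtain ⟨u, hu, hup⟩ := ih h
      exact ⟨u, List.mem_cons_of_mem _ hu, hup⟩

-- running one while-loop whose target is exactly n steps away yields the n closed-form points
theorem pvEdge_run (n : Nat) : ∀ (fuel : Nat), n < fuel → ∀ (c : Int × Int) (dx dy : Int) (acc : List (Int × Int)), dx ≠ 0 →
    pvEdge fuel c (c.1 + n * dx, c.2 + n * dy) (dx, dy) acc =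
      (acc ++ (List.range n).map (fun i : Nat => (c.1 + (i : Int) * dx, c.2 + (i : Int) * dy)),
       (c.1 + n * dx, c.2 + n * dy)) := by
  induction n with
  | zero =>
    intro fuel hf c dx dy acc _
    match fuel, hf with
    | f + 1, _ => simp [pvEdge]
  | succ n ih =>
    intro fuel hf c dx dy acc hdx
    match fuel, hf with
    | f + 1, hf =>
      have hne : c ≠ (c.1 + ((n + 1 : Nat) : Int) * dx, c.2 + ((n + 1 : Nat) : Int) * dy) := by
        intro h
        have h1 : c.1 = c.1 + ((n + 1 : Nat) : Int) * dx := congrArg Prod.fst h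
        have h0 : ((n : Int) + 1) * dx = 0 := by push_cast at h1 ⊢; omega
        rcases mul_eq_zero.mp h0 with h' | h'
        · omega
        · exact hdx h'
      have e1 : c.1 + ((n + 1 : Nat) : Int) * dx = (c.1 + dx) + (n : Int) * dx := by push_cast; ring
      have e2 : c.2 + ((n + 1 : Nat) : Int) * dy = (c.2 + dy) + (n : Int) * dy := by push_cast; ring
      have h := ih f (Nat.lt_of_succ_lt_succ hf) (c.1 + dx, c.2 + dy) dx dy (acc ++ [c]) hdx
      rw [pvEdge, if_neg hne]
      simp only [e1, e2]
      simp only at h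
      rw [h]
      congr 1
      rw [List.range_succ_eq_map]
      simp only [List.map_cons, List.map_map, Function.comp_def, List.append_assoc,
        List.singleton_append, Nat.cast_zero, zero_mul, add_zero]
      refine congrArg (acc ++ ·) (congrArg₂ List.cons rfl ?_)
      refine List.map_congr_left (fun i _ => ?_)
      rw [Prod.mk.injEq]
      exact ⟨by push_cast; ring, by push_cast; ring⟩

-- one while-loop of A, with its endpoints written in sensor/distance form
theorem pv_run (d : Int) (hd : -1 ≤ d) (x y tx ty dx dy : Int) (acc : List (Int × Int))
    (hdx : dx ≠ 0) (hx : tx = x + (d + 1) * dx) (hy : ty = y + (d + 1) * dy) :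
    pvEdge (d + 2).toNat (x, y) (tx, ty) (dx, dy) acc =
      (acc ++ (List.range (d + 1).toNat).map (fun i : Nat => (x + (i : Int) * dx, y + (i : Int) * dy)),
       (tx, ty)) := by
  have hni : (((d + 1).toNat : Nat) : Int) = d + 1 := Int.toNat_of_nonneg (by omega)
  have hfuel : (d + 1).toNat < (d + 2).toNat := by omega
  have h := pvEdge_run (d + 1).toNat (d + 2).toNat hfuel (x, y) dx dy acc hdx
  simp only at h
  rw [show ((tx, ty) : Int × Int) = (x + (((d + 1).toNat : Nat) : Int) * dx, y + (((d + 1).toNat : Nat) : Int) * dy) from by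
    rw [Prod.mk.injEq, hni]; exact ⟨hx, hy⟩]
  exact h

-- one pass of the loop body: A's four chained while-loops emit the first edge and its
-- three successive rotations, i.e. B's rotation fold
theorem pv_step (sd : List (Int × Int × Int)) (s : Int × Int) (d : Int) (acc : List (Int × Int))
    (hl : pvLookup s sd = some d) (hd : -1 ≤ d) :
    (match pvLookup s sd with
     | none => acc
     | some distance =>
       let p1 := (s.1 + distance + 1, s.2)
       let p2 := (s.1, s.2 + distance + 1)
       let p3 := (s.1 - distance - 1, s.2)
       let p4 := (s.1, s.2 - distance - 1)
       let fuel := (distance + 2).toNat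
       let r1 := pvEdge fuel p1 p2 (-1, 1) acc
       let r2 := pvEdge fuel r1.2 p3 (-1, -1) r1.1
       let r3 := pvEdge fuel r2.2 p4 (1, -1) r2.1
       let r4 := pvEdge fuel r3.2 p1 (1, 1) r3.1
       r4.1) =
    (match pvLookup s sd with
     | none => acc
     | some d =>
       let sx := s.1
       let sy := s.2
       let edge := (PySem.List.pyRange 0 (d + 1) 1).map (fun i => (sx + d + 1 - i, sy + i))
       ((List.range 4).foldl (fun (st : List (Int × Int) × List (Int × Int)) _ =>
           (st.1 ++ st.2, st.2.map (fun p => (sx - (p.2 - sy), sy + (p.1 - sx)))))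
         (acc, edge)).1) := by
  rw [hl]
  simp only
  rw [pv_run d hd (s.1 + d + 1) s.2 s.1 (s.2 + d + 1) (-1) 1 acc (by norm_num) (by ring) (by ring)]
  simp only
  rw [pv_run d hd s.1 (s.2 + d + 1) (s.1 - d - 1) s.2 (-1) (-1) _ (by norm_num) (by ring) (by ring)]
  simp only
  rw [pv_run d hd (s.1 - d - 1) s.2 s.1 (s.2 - d - 1) 1 (-1) _ (by norm_num) (by ring) (by ring)]
  simp only
  rw [pv_run d hd s.1 (s.2 - d - 1) (s.1 + d + 1) s.2 1 1 _ (by norm_num) (by ring) (by ring)]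
  simp only
  -- unroll B's four rotation iterations and fuse the maps
  rw [show (List.range 4) = [0, 1, 2, 3] from by decide]
  simp only [List.foldl_cons, List.foldl_nil, List.map_map, Function.comp_def,
    PySem.List.pyRange_one, List.append_assoc]
  have hn : (d + 1 - 0).toNat = (d + 1).toNat := by omega
  rw [hn]
  refine congrArg (acc ++ ·) ?_
  refine congrArg₂ (· ++ ·) ?_ (congrArg₂ (· ++ ·) ?_ (congrArg₂ (· ++ ·) ?_ ?_)) <;>
    exact List.map_congr_left fun i _ => by rw [Prod.mk.injEq]; constructor <;> ring

-- the whole fold, for an arbitrary accumulator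
theorem pv_fold (sd : List (Int × Int × Int)) (sl : List (Int × Int))
    (hpre : ∀ s ∈ sl, (∃ t ∈ sd, t.1 = s.1 ∧ t.2.1 = s.2) ∧
      (∀ t ∈ sd, t.1 = s.1 → t.2.1 = s.2 → -1 ≤ t.2.2)) :
    ∀ acc : List (Int × Int),
    sl.foldl (fun acc sensor =>
      match pvLookup sensor sd with
      | none => acc
      | some distance =>
        let p1 := (sensor.1 + distance + 1, sensor.2)
        let p2 := (sensor.1, sensor.2 + distance + 1)
        let p3 := (sensor.1 - distance - 1, sensor.2)
        let p4 := (sensor.1, sensor.2 - distance - 1)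
        let fuel := (distance + 2).toNat
        let r1 := pvEdge fuel p1 p2 (-1, 1) acc
        let r2 := pvEdge fuel r1.2 p3 (-1, -1) r1.1
        let r3 := pvEdge fuel r2.2 p4 (1, -1) r2.1
        let r4 := pvEdge fuel r3.2 p1 (1, 1) r3.1
        r4.1) acc =
    sl.foldl (fun acc sensor =>
      match pvLookup sensor sd with
      | none => acc
      | some d =>
        let sx := sensor.1
        let sy := sensor.2
        let edge := (PySem.List.pyRange 0 (d + 1) 1).map (fun i => (sx + d + 1 - i, sy + i))
        ((List.range 4).foldl (fun (st : List (Int × Int) × List (Int × Int)) _ =>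
            (st.1 ++ st.2, st.2.map (fun p => (sx - (p.2 - sy), sy + (p.1 - sx)))))
          (acc, edge)).1) acc := by
  induction sl with
  | nil => intro acc; rfl
  | cons s sl ih =>
    intro acc
    obtain ⟨hex, hall⟩ := hpre s (List.mem_cons_self ..)
    obtain ⟨d, hl⟩ := Option.isSome_iff_exists.mp (pvLookup_isSome s sd hex)
    obtain ⟨t, htmem, ht1, ht2, ht3⟩ := pvLookup_some_mem s sd d hl
    have hge : -1 ≤ d := ht3 ▸ hall t htmem ht1 ht2
    simp only [List.foldl_cons]
    rw [pv_step sd s d acc hl hge]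
    exact ih (fun t ht => hpre t (List.mem_cons_of_mem _ ht)) _

-- ===== VERDICT =====
theorem get_possible_coordinates_spec : Claim_equal_get_possible_coordinates := by
  intro sl sd _ hpre
  exact pv_fold sd sl hpre []
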